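-- pv_equiv track=rewrite | github.com/vllm-project/vllm-gaudi | vllm_gaudi/v1/worker/hpu_model_runner.py | _generate_seq_lengths
-- ===== SOURCE A (Python) =====
-- def _generate_seq_lengths(num_samples, num_blocks, block_size):
--     assert num_samples <= num_blocks
--     blocks = [num_blocks // num_samples] * num_samples
--     missing_blocks = num_blocks - sum(blocks)
--     for i in range(missing_blocks):
--         blocks[i] += 1
--     seq_lengths = [b * block_size - 1 for b in blocks]
--     return seq_lengths
-- ===== SOURCE B (Python) =====
-- def _generate_seq_lengths(num_samples, num_blocks, block_size):
--     assert num_samples <= num_blocks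
--     # greedy: with k samples left and `remaining` blocks left, the next sample
--     # takes the ceiling of an even share; the rest split what remains the same way.
--     seq_lengths = []
--     k, remaining = num_samples, num_blocks
--     while k > 0:
--         take = -(-remaining // k)
--         seq_lengths.append(take * block_size - 1)
--         remaining -= take
--         k -= 1
--     return seq_lengths
-- ===== Notes on version B (the rewrite author's own statement) =====
-- stated objective: alternative
-- what changed: Replaces A's allocate-uniform-list, sum() and patch-loop scheme with a single greedy loop that, with k samples left and r blocks remaining, gives the next sample ceil(r/k) blocks and continues with (k-1, r-ceil(r/k)); no divmod of the total and no remainder indexing appear.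
import Mathlib
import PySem

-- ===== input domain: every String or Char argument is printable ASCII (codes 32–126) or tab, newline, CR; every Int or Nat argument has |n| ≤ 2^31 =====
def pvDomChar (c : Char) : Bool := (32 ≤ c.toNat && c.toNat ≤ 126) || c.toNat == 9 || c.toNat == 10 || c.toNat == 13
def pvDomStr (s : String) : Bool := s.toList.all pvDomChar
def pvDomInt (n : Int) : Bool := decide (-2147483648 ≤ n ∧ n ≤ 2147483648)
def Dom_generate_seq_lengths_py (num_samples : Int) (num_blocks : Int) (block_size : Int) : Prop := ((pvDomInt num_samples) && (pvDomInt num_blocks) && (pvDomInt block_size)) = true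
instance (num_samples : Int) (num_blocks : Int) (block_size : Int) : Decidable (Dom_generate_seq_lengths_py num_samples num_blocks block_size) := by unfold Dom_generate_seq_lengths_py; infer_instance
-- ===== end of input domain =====

-- B replaces A's allocate-then-patch scheme with a greedy loop: with k samples left
-- and r blocks remaining, the next sample takes ceil(r/k); objective: alternative.


-- ===== PORT A =====
-- blocks[i] += 1 ; pyGet? = none is Python's IndexError, excluded by Pre_
def pyPatchStep (bs : List Int) (i : Int) : List Int :=
  match PySem.List.pyGet? bs i with
  | some v => bs.set i.toNat (v + 1)
  | none => bs

def generate_seq_lengths_py (num_samples : Int) (num_blocks : Int) (block_size : Int) : List Int :=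
  -- assert num_samples <= num_blocks: AssertionError excluded by Pre_;
  -- num_samples = 0 (ZeroDivisionError) excluded by Pre_
  let blocks := List.replicate num_samples.toNat (PySem.Int.floordiv num_blocks num_samples)
  let missing_blocks := num_blocks - blocks.sum
  let blocks := (PySem.List.pyRange 0 missing_blocks).foldl pyPatchStep blocks
  blocks.map (fun b => b * block_size - 1)

-- ===== PORT B =====
-- while k > 0: take = ceil(remaining / k) = -((-remaining) // k); append; loop
def gslLoop (block_size : Int) (k : Int) (remaining : Int) (seq_lengths : List Int) : List Int :=
  if _h : k ≤ 0 then seq_lengths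
  else
    let take := -(PySem.Int.floordiv (-remaining) k)
    gslLoop block_size (k - 1) (remaining - take) (seq_lengths ++ [take * block_size - 1])
termination_by k.toNat
decreasing_by omega

def generate_seq_lengths_py_alt (num_samples : Int) (num_blocks : Int) (block_size : Int) : List Int :=
  -- assert num_samples <= num_blocks: AssertionError excluded by Pre_
  gslLoop block_size num_samples num_blocks []

-- ===== PRECONDITION & SPEC =====
-- Pre_ excludes exactly the inputs where A raises: num_samples > num_blocks (AssertionError),
-- num_samples = 0 (ZeroDivisionError), and num_samples < 0 < num_blocks (IndexError).
def Pre_generate_seq_lengths_py (num_samples : Int) (num_blocks : Int) (block_size : Int) : Prop :=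
  num_samples ≤ num_blocks ∧ num_samples ≠ 0 ∧ (1 ≤ num_samples ∨ num_blocks ≤ 0)
instance (num_samples : Int) (num_blocks : Int) (block_size : Int) : Decidable (Pre_generate_seq_lengths_py num_samples num_blocks block_size) := by unfold Pre_generate_seq_lengths_py; infer_instance
def pvWitness_generate_seq_lengths_py : Int × Int × Int := (3, 7, 4)

def Spec_generate_seq_lengths_py (num_samples : Int) (num_blocks : Int) (block_size : Int) (out : List Int) : Prop := out = generate_seq_lengths_py_alt num_samples num_blocks block_size
instance (num_samples : Int) (num_blocks : Int) (block_size : Int) (out : List Int) : Decidable (Spec_generate_seq_lengths_py num_samples num_blocks block_size out) := by unfold Spec_generate_seq_lengths_py; infer_instance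

-- ===== CLAIM (what is proved, stated in full; the proofs are below) =====
def Claim_equal_generate_seq_lengths_py : Prop := ∀ (num_samples : Int) (num_blocks : Int) (block_size : Int), Dom_generate_seq_lengths_py num_samples num_blocks block_size → Pre_generate_seq_lengths_py num_samples num_blocks block_size → Spec_generate_seq_lengths_py num_samples num_blocks block_size (generate_seq_lengths_py num_samples num_blocks block_size)

-- ===== LEMMAS AND PROOFS =====

lemma pyRange_zero_nonpos (b : Int) (hb : b ≤ 0) : PySem.List.pyRange 0 b = [] := by
  rw [PySem.List.pyRange_of_pos 0 b (by norm_num : (0:Int) < 1), if_neg (by omega)]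
  simp

-- A's patch loop applied to a uniform list yields the per-index closed form.
lemma patch_replicate (base : Int) (m k : Nat) (hmk : m ≤ k) :
    (PySem.List.pyRange 0 (m : Int)).foldl pyPatchStep (List.replicate k base)
      = (List.range k).map (fun (i : Nat) => base + (if (i : Int) < (m : Int) then 1 else 0)) := by
  induction m with
  | zero =>
      rw [Nat.cast_zero, pyRange_zero_nonpos 0 (by omega), List.foldl_nil]
      refine List.ext_getElem (by simp) ?_
      intro i h1 h2
      rw [List.getElem_replicate, List.getElem_map, List.getElem_range,
          if_neg (by omega)]
      ring
  | succ m ih =>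
      have hm : m < k := hmk
      rw [show ((m + 1 : Nat) : Int) = (m : Int) + 1 by push_cast; ring,
          PySem.List.pyRange_one_succ_right (by omega : (0:Int) ≤ (m:Int)),
          List.foldl_append, ih (Nat.le_of_lt hm)]
      have hget : PySem.List.pyGet?
          ((List.range k).map (fun (i : Nat) => base + (if (i : Int) < (m : Int) then 1 else 0)))
          (m : Int) = some base := by
        rw [PySem.List.pyGet?_natCast, List.getElem?_map, List.getElem?_range hm]
        simp
      simp only [List.foldl_cons, List.foldl_nil, pyPatchStep, hget, Int.toNat_natCast]
      refine List.ext_getElem (by simp) ?_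
      intro i h1 h2
      have h2' : i < k := by simpa using h2
      rw [List.getElem_set, List.getElem_map, List.getElem_range]
      by_cases him : m = i
      · subst him
        rw [if_pos rfl, List.getElem_map, List.getElem_range,
            if_pos (by omega : ((m : Int) < (m : Int) + 1))]
      · have hiff : ((i : Int) < (m : Int)) = ((i : Int) < (m : Int) + 1) := by
          have hne : i ≠ m := fun h => him h.symm
          simp only [eq_iff_iff]
          omega
        rw [if_neg him, List.getElem_map, List.getElem_range]
        simp only [hiff]

-- proof helper: the same greedy recursion in cons form
def gslGo (block_size : Int) (k : Int) (remaining : Int) : List Int :=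
  if _h : k ≤ 0 then []
  else
    let take := -(PySem.Int.floordiv (-remaining) k)
    (take * block_size - 1) :: gslGo block_size (k - 1) (remaining - take)
termination_by k.toNat
decreasing_by omega

-- the accumulator loop is the cons-form recursion with the accumulator appended in front
lemma gslLoop_eq_acc (bs : Int) (n : Nat) : ∀ (r : Int) (acc : List Int),
    gslLoop bs (n : Int) r acc = acc ++ gslGo bs (n : Int) r := by
  induction n with
  | zero =>
      intro r acc
      rw [gslLoop, gslGo]
      simp
  | succ n ih =>
      intro r acc
      have hk : ¬ ((n + 1 : Nat) : Int) ≤ 0 := by push_cast; omega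
      rw [gslLoop, gslGo, dif_neg hk, dif_neg hk,
          show ((n + 1 : Nat) : Int) - 1 = (n : Int) by push_cast; ring, ih]
      simp

-- B's greedy recursion yields the same per-index closed form.
lemma greedy_eq (bs : Int) (n : Nat) (r : Int) :
    gslGo bs (n : Int) r
      = (List.range n).map (fun (j : Nat) =>
          (PySem.Int.floordiv r (n : Int)
            + (if (j : Int) < PySem.Int.mod r (n : Int) then 1 else 0)) * bs - 1) := by
  induction n generalizing r with
  | zero =>
      rw [gslGo]
      simp
  | succ n ih =>
      have hk : (0 : Int) < ((n + 1 : Nat) : Int) := by push_cast; omega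
      set K : Int := ((n + 1 : Nat) : Int) with hK
      set b := PySem.Int.floordiv r K with hb
      set m := PySem.Int.mod r K with hm
      have hKn : K = (n : Int) + 1 := by rw [hK]; push_cast; ring
      have hid : b * K + m = r := PySem.Int.floordiv_mul_add_mod r K
      have hid' : b * (n : Int) + b + m = r := by
        rw [hKn] at hid; linear_combination hid
      have hm0 : 0 ≤ m := PySem.Int.mod_nonneg r hk
      have hmlt : m < K := PySem.Int.mod_lt r hk
      have hmlt' : m < (n : Int) + 1 := hKn ▸ hmlt
      have ht : -(PySem.Int.floordiv (-r) K) = b + (if m = 0 then 0 else 1) := by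
        rw [PySem.Int.neg_floordiv_neg_eq_iff_of_pos hk, hKn]
        have hn0 : (0 : Int) ≤ (n : Int) := Nat.cast_nonneg n
        by_cases hz : m = 0
        · simp only [hz, ite_true]
          constructor <;> nlinarith [hid', hm0, hmlt', hn0]
        · have hm1 : 1 ≤ m := by omega
          simp only [hz, ite_false]
          constructor <;> nlinarith [hid', hm1, hmlt', hn0]
      -- characterize the tail's divisor data
      have htail : ∀ j : Nat, j < n →
          PySem.Int.floordiv (r - (b + (if m = 0 then 0 else 1))) (n : Int)
              + (if (j : Int) < PySem.Int.mod (r - (b + (if m = 0 then 0 else 1))) (n : Int) then 1 else 0)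
            = b + (if ((j : Int) + 1) < m then 1 else 0) := by
        intro j hj
        have hn : (0 : Int) < (n : Int) := by exact_mod_cast Nat.zero_lt_of_lt hj
        by_cases hz : m = 0
        · have hfd : PySem.Int.floordiv (r - (b + 0)) (n : Int) = b := by
            rw [PySem.Int.floordiv_eq_iff_of_pos hn]
            constructor <;> nlinarith [hid', hz]
          have hmd : PySem.Int.mod (r - (b + 0)) (n : Int) = 0 := by
            have hident := PySem.Int.floordiv_mul_add_mod (r - (b + 0)) (n : Int)
            rw [hfd] at hident
            linarith [hident, hid', hz]
          simp only [hz, ite_true, hfd, hmd]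
          rw [if_neg (by omega), if_neg (by omega)]
        · have hm1 : 1 ≤ m := by omega
          have hfd : PySem.Int.floordiv (r - (b + 1)) (n : Int) = b := by
            rw [PySem.Int.floordiv_eq_iff_of_pos hn]
            constructor <;> nlinarith [hid', hmlt']
          have hmd : PySem.Int.mod (r - (b + 1)) (n : Int) = m - 1 := by
            have hident := PySem.Int.floordiv_mul_add_mod (r - (b + 1)) (n : Int)
            rw [hfd] at hident
            linarith [hident, hid']
          simp only [hz, ite_false, hfd, hmd]
          have hiff : (((j : Nat) : Int) < m - 1) ↔ (((j : Int) + 1) < m) := by omega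
          rw [if_congr hiff (by rfl) (by rfl)]
      rw [gslGo, dif_neg (by omega : ¬ K ≤ 0)]
      simp only [ht]
      rw [show K - 1 = (n : Int) by rw [hKn]; ring, ih]
      -- assemble head :: tail  =  map over range (n+1)
      rw [List.range_succ_eq_map, List.map_cons, List.map_map]
      congr 1
      · -- head
        by_cases hz : m = 0
        · simp only [hz, ite_true]
          rw [Nat.cast_zero, if_neg (by omega : ¬ (0:Int) < 0)]
        · simp only [hz, ite_false]
          rw [Nat.cast_zero, if_pos (by omega : (0:Int) < m)]
      · -- tail
        refine List.map_congr_left ?_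
        intro i hi
        have hi' : i < n := List.mem_range.mp hi
        have hstep := htail i hi'
        simp only [Function.comp_apply]
        have hcast : ((Nat.succ i : Nat) : Int) = (i : Int) + 1 := by push_cast; ring
        rw [show (Nat.succ i) = i + 1 from rfl]
        push_cast
        linear_combination bs * hstep

-- ===== VERDICT (by name: the statement is the Claim_ definition above) =====
theorem generate_seq_lengths_py_spec : Claim_equal_generate_seq_lengths_py := by
  intro ns nb bs _ hpre
  obtain ⟨hle, hne, hpos⟩ := hpre
  unfold Spec_generate_seq_lengths_py generate_seq_lengths_py_alt
  rcases hpos with hpos | hneg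
  · -- 1 ≤ ns: both sides equal the per-index closed form
    have hns0 : (0 : Int) < ns := hpos
    have hrem0 : 0 ≤ PySem.Int.mod nb ns := PySem.Int.mod_nonneg nb hns0
    have hremlt : PySem.Int.mod nb ns < ns := PySem.Int.mod_lt nb hns0
    have hnsnat : ((ns.toNat : Nat) : Int) = ns := Int.toNat_of_nonneg (le_of_lt hns0)
    have hremnat : (((PySem.Int.mod nb ns).toNat : Nat) : Int) = PySem.Int.mod nb ns :=
      Int.toNat_of_nonneg hrem0
    have hmiss : nb - (List.replicate ns.toNat (PySem.Int.floordiv nb ns)).sum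
        = PySem.Int.mod nb ns := by
      rw [List.sum_replicate, nsmul_eq_mul, hnsnat]
      have := PySem.Int.floordiv_mul_add_mod nb ns
      linarith
    simp only [generate_seq_lengths_py]
    have hB : gslLoop bs ns nb [] = (List.range ns.toNat).map (fun (j : Nat) =>
        (PySem.Int.floordiv nb ns
          + (if (j : Int) < PySem.Int.mod nb ns then 1 else 0)) * bs - 1) := by
      have h1 := gslLoop_eq_acc bs ns.toNat nb []
      have h2 := greedy_eq bs ns.toNat nb
      rw [hnsnat] at h1 h2
      rw [h1, h2, List.nil_append]
    rw [hmiss,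
        show PySem.Int.mod nb ns = (((PySem.Int.mod nb ns).toNat : Nat) : Int) from hremnat.symm,
        patch_replicate (PySem.Int.floordiv nb ns) (PySem.Int.mod nb ns).toNat ns.toNat (by omega),
        hB, List.map_map]
    refine List.map_congr_left ?_
    intro i _
    simp only [Function.comp_apply, hremnat]
  · -- ns < 0 and nb ≤ 0: both sides are []
    have hns : ns < 0 := by omega
    simp only [generate_seq_lengths_py]
    rw [gslLoop, dif_pos (by omega : ns ≤ 0), show ns.toNat = 0 from by omega]
    simp only [List.replicate_zero, List.sum_nil, sub_zero]
    rw [pyRange_zero_nonpos nb hneg]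
    simp
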